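-- pv_equiv track=rewrite | github.com/LuisCarlosAlvaradoG/DDA02024 | CasosPruebaExamen!!.py | modificar_matriz
-- ===== SOURCE A (Python) =====
-- def modificar_matriz(matriz, N, M):
--     # Función para calcular la suma de los vecinos para un elemento que no está en los bordes
--     def suma_vecinos(i, j):
--         suma = 0
--         # Sumar vecinos de arriba, abajo, izquierda y derecha
--         for di, dj in [(-1, 0), (1, 0), (0, -1), (0, 1)]:
--             ni, nj = i + di, j + dj
--             # Verificar si la posición está dentro de los límites de la matriz
--             if 0 <= ni < N and 0 <= nj < M:
--                 suma += matriz[ni][nj]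
--         return suma
--
--     # Crear una nueva matriz para almacenar los resultados
--     matriz_modificada = [fila[:] for fila in matriz]  # Copiar la matriz original
--
--     # Procesar las filas internas (sin los bordes)
--     for i in range(1, N-1):  # Evitar las primeras y últimas filas
--         for j in range(1, M-1):  # Evitar las primeras y últimas columnas
--             # Modificar el valor de la matriz con la suma de los vecinos
--             matriz_modificada[i][j] = suma_vecinos(i, j)
--
--     # Invertir las filas impares (filas con índice impar)
--     for i in range(1, N-1, 2):
--         matriz_modificada[i][1:M-1] = matriz_modificada[i][1:M-1][::-1]
--
--     return matriz_modificada
-- ===== SOURCE B (Python) =====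
-- def modificar_matriz(matriz, N, M):
--     # Shift-and-zip stencil: neighbour sums come from zipping slices of the
--     # row triple (arriba, fila, abajo) -- no per-cell indexing at all.
--     if N < 3 or M < 3:
--         return [fila[:] for fila in matriz]
--     filas = matriz[:N]
--     interiores = []
--     for arriba, fila, abajo in zip(filas, filas[1:], filas[2:]):
--         interiores.append([u + d + l + r for u, d, l, r in
--                            zip(arriba[1:M-1], abajo[1:M-1], fila[0:M-2], fila[2:M])])
--     resultado = [matriz[0][:]]
--     for i, (fila, vals) in enumerate(zip(filas[1:N-1], interiores), start=1):
--         if i % 2: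
--             vals = vals[::-1]
--         resultado.append(fila[:1] + vals + fila[M-1:])
--     resultado.extend(fila[:] for fila in matriz[N-1:])
--     return resultado
-- ===== Notes on version B (the rewrite author's own statement) =====
-- stated objective: alternative
-- what changed: B computes the stencil by zipping slices of each consecutive row triple (arriba[1:M-1], abajo[1:M-1], fila[:M-2], fila[2:M]) and assembles the output as concatenations border-row / rebuilt interior rows / tail rows, with no per-cell indexing, no bounds-checking helper and no in-place mutation, unlike A's deep copy mutated by a nested per-cell loop plus a separate odd-row reversal pass.
-- intended difference: On inputs with M <= 0 and N >= 3, A's slice bound M-1 is a negative index that wraps around to the end of the row, so A returns the matrix with a middle segment of each odd interior row reversed even though there are no interior columns; B returns the matrix unchanged, the intended no-op when M < 3. — e.g. on modificar_matriz([[0], [1, 2, 3, 4], [0]], 3, 0): A returns [[0], [1, 3, 2, 4], [0]], B returns [[0], [1, 2, 3, 4], [0]]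
import Mathlib
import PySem

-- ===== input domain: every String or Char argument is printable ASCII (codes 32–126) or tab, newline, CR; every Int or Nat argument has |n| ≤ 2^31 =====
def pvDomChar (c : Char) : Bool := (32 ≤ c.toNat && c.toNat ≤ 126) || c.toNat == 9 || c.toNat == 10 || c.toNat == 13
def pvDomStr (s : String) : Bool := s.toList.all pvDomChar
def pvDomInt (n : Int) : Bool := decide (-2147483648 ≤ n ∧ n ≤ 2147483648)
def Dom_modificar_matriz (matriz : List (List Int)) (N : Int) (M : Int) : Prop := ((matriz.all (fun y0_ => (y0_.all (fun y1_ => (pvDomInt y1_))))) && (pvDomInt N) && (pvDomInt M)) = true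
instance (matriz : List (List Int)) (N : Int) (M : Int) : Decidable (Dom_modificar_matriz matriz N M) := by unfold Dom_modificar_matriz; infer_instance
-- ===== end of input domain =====

-- B is a slice-and-zip stencil (sums from zipped slices of consecutive row triples, output assembled
-- by concatenation) instead of A's mutated deep copy with a per-cell indexing helper; return values agree.

-- matriz[i][j] as a total lookup; Pre_ keeps every access performed by the programs in range
def pvCell (matriz : List (List Int)) (i j : Int) : Int :=
  PySem.List.pyGetD (PySem.List.pyGetD matriz i []) j 0

-- Python slice assignment  xs[a:b] = v  (clamped bounds, exact Python semantics for step-1 slices)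
def pvSetSlice (xs : List Int) (a b : Int) (v : List Int) : List Int :=
  xs.take (PySem.List.clampIdx xs.length a) ++ v ++
    xs.drop (max (PySem.List.clampIdx xs.length b) (PySem.List.clampIdx xs.length a))

-- ===== PORT A =====
def pvSumaVecinos (matriz : List (List Int)) (N M i j : Int) : Int :=
  [((-1 : Int), (0 : Int)), (1, 0), (0, -1), (0, 1)].foldl
    (fun suma d =>
      let ni := i + d.1
      let nj := j + d.2
      if 0 ≤ ni ∧ ni < N ∧ 0 ≤ nj ∧ nj < M then suma + pvCell matriz ni nj else suma) 0

def modificar_matriz (matriz : List (List Int)) (N : Int) (M : Int) : List (List Int) :=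
  let mm0 := matriz.map (fun fila => PySem.List.slice fila none none)     -- [fila[:] for fila in matriz]
  let mm1 := (PySem.List.pyRange 1 (N - 1) 1).foldl
    (fun mm i =>
      (PySem.List.pyRange 1 (M - 1) 1).foldl
        (fun mm j =>
          PySem.List.pySetD mm i
            (PySem.List.pySetD (PySem.List.pyGetD mm i []) j (pvSumaVecinos matriz N M i j))) mm) mm0
  -- mm[i][1:M-1] = mm[i][1:M-1][::-1]  ([::-1] is reverse, PySem.List.slice?_none_none_neg_one)
  (PySem.List.pyRange 1 (N - 1) 2).foldl
    (fun mm i =>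
      let fila := PySem.List.pyGetD mm i []
      PySem.List.pySetD mm i
        (pvSetSlice fila 1 (M - 1) (PySem.List.slice fila (some 1) (some (M - 1))).reverse)) mm1

-- ===== PORT B =====
-- the zipped-slice neighbour sums for the row triple (arriba, fila, abajo)
def pvSumaZip (M : Int) (arriba fila abajo : List Int) : List Int :=
  ((PySem.List.slice arriba (some 1) (some (M - 1))).zip
    ((PySem.List.slice abajo (some 1) (some (M - 1))).zip
      ((PySem.List.slice fila (some 0) (some (M - 2))).zip
        (PySem.List.slice fila (some 2) (some M))))).map
    (fun q => q.1 + q.2.1 + q.2.2.1 + q.2.2.2)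

def modificar_matriz_alt (matriz : List (List Int)) (N : Int) (M : Int) : List (List Int) :=
  if N < 3 ∨ M < 3 then matriz.map (fun fila => PySem.List.slice fila none none)
  else
    let filas := PySem.List.slice matriz none (some N)
    -- for arriba, fila, abajo in zip(filas, filas[1:], filas[2:]): interiores.append([...])
    let interiores := (filas.zip ((PySem.List.slice filas (some 1) none).zip
        (PySem.List.slice filas (some 2) none))).foldl
      (fun acc t => acc ++ [pvSumaZip M t.1 t.2.1 t.2.2]) []
    let resultado := [PySem.List.slice (PySem.List.pyGetD matriz 0 []) none none]
    -- for i, (fila, vals) in enumerate(zip(filas[1:N-1], interiores), start=1):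
    let resultado := (PySem.List.enumerate
        ((PySem.List.slice filas (some 1) (some (N - 1))).zip interiores) 1).foldl
      (fun res p =>
        -- vals[::-1] is reverse (PySem.List.slice?_none_none_neg_one)
        let vals := if PySem.Int.mod p.1 2 ≠ 0 then p.2.2.reverse else p.2.2
        res ++ [PySem.List.slice p.2.1 none (some 1) ++ vals ++
                PySem.List.slice p.2.1 (some (M - 1)) none]) resultado
    resultado ++ (PySem.List.slice matriz (some (N - 1)) none).map
      (fun fila => PySem.List.slice fila none none)

-- ===== PRECONDITION & SPEC =====
-- Pre_ is exactly the set of inputs on which A returns (A raises IndexError when the interior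
-- loops or the odd-row pass index a row/column that the matrix does not actually have).
def Pre_modificar_matriz (matriz : List (List Int)) (N : Int) (M : Int) : Prop :=
  (3 ≤ N → (if (N - 2) % 2 = 1 then N - 2 else N - 3) < (matriz.length : Int)) ∧
  ((3 ≤ N ∧ 3 ≤ M) →
    N ≤ (matriz.length : Int) ∧
    (∀ i : Nat, i < matriz.length →
      (((i : Int) ≤ N - 1) → M - 1 ≤ ((matriz.getD i []).length : Int)) ∧
      (1 ≤ i → (i : Int) ≤ N - 2 → M ≤ ((matriz.getD i []).length : Int))))
instance (matriz : List (List Int)) (N : Int) (M : Int) : Decidable (Pre_modificar_matriz matriz N M) := by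
  unfold Pre_modificar_matriz; infer_instance

def pvWitness_modificar_matriz : List (List Int) × Int × Int := ([[1, 2, 3], [4, 5, 6], [7, 8, 9]], 3, 3)

-- On inputs with M ≤ 0 and N ≥ 3, A's slice bound M-1 is a negative index that wraps around to the
-- end of the row, so A reverses a middle segment of each odd interior row even though there are no
-- interior columns; B leaves the matrix unchanged there, the intended no-op when M < 3.
def D_modificar_matriz (matriz : List (List Int)) (N : Int) (M : Int) : Prop :=
  M ≤ 0 ∧ 3 ≤ N ∧ ∃ i : Nat, i < matriz.length ∧ 1 ≤ i ∧ (i : Int) ≤ N - 2 ∧ i % 2 = 1 ∧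
    PySem.List.slice (matriz.getD i []) (some 1) (some (M - 1)) ≠
      (PySem.List.slice (matriz.getD i []) (some 1) (some (M - 1))).reverse
instance (matriz : List (List Int)) (N : Int) (M : Int) : Decidable (D_modificar_matriz matriz N M) := by
  unfold D_modificar_matriz; infer_instance

def Spec_modificar_matriz (matriz : List (List Int)) (N : Int) (M : Int) (out : List (List Int)) : Prop :=
  ¬ D_modificar_matriz matriz N M → out = modificar_matriz_alt matriz N M
instance (matriz : List (List Int)) (N : Int) (M : Int) (out : List (List Int)) : Decidable (Spec_modificar_matriz matriz N M out) := by
  unfold Spec_modificar_matriz; infer_instance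

def pvDiffWitness_modificar_matriz : List (List Int) × Int × Int := ([[0], [1, 2, 3, 4], [0]], 3, 0)
def pvDiffWitnessOut_modificar_matriz : (List (List Int)) × (List (List Int)) :=
  ([[0], [1, 3, 2, 4], [0]], [[0], [1, 2, 3, 4], [0]])

-- ===== CLAIM (what is proved, stated in full; the proofs are below) =====
def Claim_unchanged_modificar_matriz : Prop := ∀ (matriz : List (List Int)) (N : Int) (M : Int), Dom_modificar_matriz matriz N M → Pre_modificar_matriz matriz N M → Spec_modificar_matriz matriz N M (modificar_matriz matriz N M)
def Claim_changed_modificar_matriz : Prop := Dom_modificar_matriz (pvDiffWitness_modificar_matriz.1) (pvDiffWitness_modificar_matriz.2.1) (pvDiffWitness_modificar_matriz.2.2) ∧ Pre_modificar_matriz (pvDiffWitness_modificar_matriz.1) (pvDiffWitness_modificar_matriz.2.1) (pvDiffWitness_modificar_matriz.2.2) ∧ D_modificar_matriz (pvDiffWitness_modificar_matriz.1) (pvDiffWitness_modificar_matriz.2.1) (pvDiffWitness_modificar_matriz.2.2) ∧ modificar_matriz (pvDiffWitness_modificar_matriz.1) (pvDiffWitness_modificar_matriz.2.1) (pvDiffWitness_modificar_matriz.2.2)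 = pvDiffWitnessOut_modificar_matriz.1 ∧ modificar_matriz_alt (pvDiffWitness_modificar_matriz.1) (pvDiffWitness_modificar_matriz.2.1) (pvDiffWitness_modificar_matriz.2.2) = pvDiffWitnessOut_modificar_matriz.2 ∧ pvDiffWitnessOut_modificar_matriz.1 ≠ pvDiffWitnessOut_modificar_matriz.2
def Claim_exact_modificar_matriz : Prop := ∀ (matriz : List (List Int)) (N : Int) (M : Int), Dom_modificar_matriz matriz N M → Pre_modificar_matriz matriz N M → D_modificar_matriz matriz N M → modificar_matriz matriz N M ≠ modificar_matriz_alt matriz N M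

-- ===== LEMMAS AND PROOFS =====

-- proof-only helpers: the per-row operations A performs on an interior row
def pvFill (matriz : List (List Int)) (N M : Int) (i : Int) (row : List Int) : List Int :=
  (PySem.List.pyRange 1 (M - 1) 1).foldl
    (fun r j => PySem.List.pySetD r j (pvSumaVecinos matriz N M i j)) row

def pvRev (M : Int) (row : List Int) : List Int :=
  pvSetSlice row 1 (M - 1) (PySem.List.slice row (some 1) (some (M - 1))).reverse

-- slice in clamped drop/take form
theorem pv_slice_eq_clamp (xs : List Int) (a b : Int) :
    PySem.List.slice xs (some a) (some b)
      = (xs.drop (PySem.List.clampIdx xs.length a)).take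
          (PySem.List.clampIdx xs.length b - PySem.List.clampIdx xs.length a) := rfl

theorem pv_setSlice_slice_self (xs : List Int) (a b : Int) :
    pvSetSlice xs a b (PySem.List.slice xs (some a) (some b)) = xs := by
  rw [pv_slice_eq_clamp]
  unfold pvSetSlice
  set s := PySem.List.clampIdx xs.length a with hs
  set e0 := PySem.List.clampIdx xs.length b with he0
  by_cases h : e0 ≤ s
  · have h0 : e0 - s = 0 := by omega
    have hm : max e0 s = s := by omega
    simp only [h0, hm, List.take_zero, List.append_nil]
    exact List.take_append_drop _ _
  · have hm : max e0 s = e0 := by omega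
    rw [hm]
    have hd : xs.drop e0 = (xs.drop s).drop (e0 - s) := by
      rw [List.drop_drop]; congr 1; omega
    rw [hd, List.append_assoc, List.take_append_drop]
    exact List.take_append_drop _ _

theorem pv_setSlice_middle (A B C v : List Int) (hA : A.length = 1) (b : Int)
    (hb : b = 1 + (B.length : Int)) :
    pvSetSlice (A ++ B ++ C) 1 b v = A ++ v ++ C := by
  subst hb
  unfold pvSetSlice
  have h1 : PySem.List.clampIdx (A ++ B ++ C).length 1 = 1 := by
    rw [show (1 : Int) = ((1 : Nat) : Int) by norm_num, PySem.List.clampIdx_natCast]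
    simp [hA]
  have h2 : PySem.List.clampIdx (A ++ B ++ C).length (1 + (B.length : Int)) = 1 + B.length := by
    rw [show (1 : Int) + (B.length : Int) = ((1 + B.length : Nat) : Int) by push_cast; ring,
       PySem.List.clampIdx_natCast]
    simp [hA]
  rw [h1, h2]
  have hm : max (1 + B.length) 1 = 1 + B.length := by omega
  rw [hm]
  have ht : (A ++ B ++ C).take 1 = A := by
    rw [List.append_assoc, ← hA, List.take_left]
  have hd : (A ++ B ++ C).drop (1 + B.length) = C := by
    have h3 : (A ++ B).length = 1 + B.length := by simp [hA]
    rw [← h3, List.drop_left]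
  rw [ht, hd]

theorem pv_slice_middle (A B C : List Int) (hA : A.length = 1) (b : Int)
    (hb : b = 1 + (B.length : Int)) :
    PySem.List.slice (A ++ B ++ C) (some 1) (some b) = B := by
  subst hb
  rw [pv_slice_eq_clamp]
  have h1 : PySem.List.clampIdx (A ++ B ++ C).length 1 = 1 := by
    rw [show (1 : Int) = ((1 : Nat) : Int) by norm_num, PySem.List.clampIdx_natCast]
    simp [hA]
  have h2 : PySem.List.clampIdx (A ++ B ++ C).length (1 + (B.length : Int)) = 1 + B.length := by
    rw [show (1 : Int) + (B.length : Int) = ((1 + B.length : Nat) : Int) by push_cast; ring,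
       PySem.List.clampIdx_natCast]
    simp [hA]
  rw [h1, h2]
  have hd : (A ++ B ++ C).drop 1 = B ++ C := by
    rw [List.append_assoc, show 1 = A.length by omega, List.drop_left]
  rw [hd, show 1 + B.length - 1 = B.length by omega, List.take_left]

theorem pv_pairwise_lt_pyRange_two (a b : Int) :
    (PySem.List.pyRange a b 2).Pairwise (· < ·) := by
  rw [PySem.List.pyRange_of_pos a b (by norm_num)]
  rw [List.pairwise_map]
  exact List.pairwise_lt_range.imp (by intro x y h; omega)

theorem pv_rowfill (f : Int → Int) (row : List Int) (k : Nat) (hk : k + 1 ≤ row.length) :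
    (PySem.List.pyRange 1 (1 + (k : Int)) 1).foldl
        (fun r j => PySem.List.pySetD r j (f j)) row
      = row.take 1 ++ (PySem.List.pyRange 1 (1 + (k : Int)) 1).map f ++ row.drop (1 + k) := by
  induction k with
  | zero =>
    simp only [Nat.cast_zero, add_zero]
    rw [PySem.List.pyRange_one_eq_nil le_rfl]
    simp only [List.foldl_nil, List.map_nil, List.append_nil]
    exact (List.take_append_drop _ _).symm
  | succ n ih =>
    have hc : (1 : Int) + ((n + 1 : Nat) : Int) = (1 + (n : Int)) + 1 := by push_cast; ring
    rw [hc, PySem.List.pyRange_one_succ_right (by omega), List.foldl_append, List.map_append]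
    rw [ih (by omega)]
    simp only [List.foldl_cons, List.foldl_nil, List.map_cons, List.map_nil]
    rw [PySem.List.pySetD_of_nonneg _ _ (by omega : (0:Int) ≤ 1 + (n:Int))]
    have hlenmap : ((PySem.List.pyRange 1 (1 + (n : Int)) 1).map f).length = n := by
      rw [List.length_map, PySem.List.length_pyRange_one]; omega
    have htn : ((1 : Int) + (n : Int)).toNat = 1 + n := by omega
    have hpre : (row.take 1 ++ (PySem.List.pyRange 1 (1 + (n : Int)) 1).map f).length = 1 + n := by
      rw [List.length_append, List.length_take, hlenmap]; omega
    rw [htn, List.set_append_right _ _ (by omega), hpre]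
    have hdrop : row.drop (1 + n) = row[1 + n] :: row.drop (1 + n + 1) := by
      rw [List.getElem_cons_drop]
    rw [show 1 + n - (1 + n) = 0 by omega, hdrop, List.set_cons_zero]
    simp [List.append_assoc]
    omega

theorem pv_inner_collapse (t : Nat) (js : List Int) (g : Int → Int) (mm : List (List Int)) :
    js.foldl (fun mm j => mm.set t (PySem.List.pySetD (mm.getD t []) j (g j))) mm
      = mm.set t (js.foldl (fun r j => PySem.List.pySetD r j (g j)) (mm.getD t [])) := by
  induction js generalizing mm with
  | nil =>
    simp only [List.foldl_nil]
    by_cases h : t < mm.length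
    · have : mm.getD t [] = mm[t] := by
        rw [List.getD_eq_getElem?_getD, List.getElem?_eq_getElem h]; rfl
      rw [this, List.set_getElem_self]
    · rw [List.set_eq_of_length_le (by omega)]
  | cons j js ih =>
    simp only [List.foldl_cons]
    rw [ih]
    by_cases h : t < mm.length
    · rw [List.set_set]
      congr 1
      have : (mm.set t (PySem.List.pySetD (mm.getD t []) j (g j))).getD t []
          = PySem.List.pySetD (mm.getD t []) j (g j) := by
        rw [List.getD_eq_getElem?_getD, List.getElem?_set_self (by simpa using h)]
        rfl
      rw [this]
    · have hle : mm.length ≤ t := by omega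
      rw [List.set_eq_of_length_le (by simpa using hle), List.set_eq_of_length_le hle,
          List.set_eq_of_length_le hle]

theorem pv_foldl_set_char (is : List Int) (hnn : ∀ i ∈ is, 0 ≤ i)
    (hp : is.Pairwise (· < ·)) (F : Int → List Int → List Int)
    (mm : List (List Int)) (k : Nat) :
    (is.foldl (fun mm i => mm.set i.toNat (F i (mm.getD i.toNat []))) mm)[k]?
      = if (k : Int) ∈ is then (mm[k]?).map (F (k : Int)) else mm[k]? := by
  induction is generalizing mm with
  | nil => simp
  | cons i is ih =>
    have hi0 : 0 ≤ i := hnn i (by simp)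
    have hlt : ∀ x ∈ is, i < x := by
      intro x hx; exact (List.pairwise_cons.mp hp).1 x hx
    simp only [List.foldl_cons]
    rw [ih (fun x hx => hnn x (by simp [hx])) (List.pairwise_cons.mp hp).2]
    by_cases hmem : (k : Int) ∈ is
    · have hne : i.toNat ≠ k := by
        have := hlt _ hmem; omega
      rw [if_pos hmem, if_pos (by simp [hmem])]
      rw [List.getElem?_set_ne hne]
    · by_cases heq : (k : Int) = i
      · have ht : i.toNat = k := by omega
        rw [if_neg hmem, if_pos (by simp [heq])]
        subst ht
        by_cases h : i.toNat < mm.length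
        · rw [List.getElem?_set_self h]
          rw [List.getElem?_eq_getElem h, Option.map_some]
          have : mm.getD i.toNat [] = mm[i.toNat] := by
            rw [List.getD_eq_getElem?_getD, List.getElem?_eq_getElem h]; rfl
          rw [this, heq]
        · rw [List.set_eq_of_length_le (by omega), List.getElem?_eq_none (by omega)]
          rfl
      · have hne : i.toNat ≠ k := by omega
        rw [if_neg hmem, if_neg (by simp [hmem, heq]), List.getElem?_set_ne hne]

theorem pv_suma_eq (matriz : List (List Int)) (N M i j : Int)
    (hi1 : 1 ≤ i) (hi2 : i ≤ N - 2) (hj1 : 1 ≤ j) (hj2 : j ≤ M - 2) :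
    pvSumaVecinos matriz N M i j
      = pvCell matriz (i - 1) j + pvCell matriz (i + 1) j +
        pvCell matriz i (j - 1) + pvCell matriz i (j + 1) := by
  simp only [pvSumaVecinos, List.foldl_cons, List.foldl_nil]
  rw [if_pos (by constructor <;> [omega; constructor <;> [omega; constructor <;> omega]])]
  rw [if_pos (by constructor <;> [omega; constructor <;> [omega; constructor <;> omega]])]
  rw [if_pos (by constructor <;> [omega; constructor <;> [omega; constructor <;> omega]])]
  rw [if_pos (by constructor <;> [omega; constructor <;> [omega; constructor <;> omega]])]
  simp only [add_zero, zero_add, ← sub_eq_add_neg]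

def pvVals (matriz : List (List Int)) (M i : Int) : List Int :=
  (PySem.List.pyRange 1 (M - 1) 1).map
    (fun j => pvCell matriz (i - 1) j + pvCell matriz (i + 1) j +
              pvCell matriz i (j - 1) + pvCell matriz i (j + 1))

theorem pv_fill_eval (matriz : List (List Int)) (N M : Int) (k : Nat) (row : List Int)
    (hc1 : 1 ≤ (k : Int)) (hc2 : (k : Int) < N - 1) (hM : 3 ≤ M)
    (hlen : M ≤ (row.length : Int)) :
    pvFill matriz N M (k : Int) row
      = row.take 1 ++ pvVals matriz M (k : Int) ++ row.drop (M - 1).toNat := by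
  unfold pvFill pvVals
  have hM1 : M - 1 = 1 + (((M - 2).toNat : Nat) : Int) := by omega
  rw [hM1, pv_rowfill _ _ _ (by omega)]
  rw [show ((1 : Int) + (((M - 2).toNat : Nat) : Int)).toNat = 1 + (M - 2).toNat by omega]
  congr 1
  congr 1
  apply List.map_congr_left
  intro j hj
  have hjb := PySem.List.mem_pyRange_one.mp hj
  exact pv_suma_eq matriz N M _ j (by omega) (by omega) (by omega) (by omega)

-- A's result, read off row by row
theorem pv_A_char (matriz : List (List Int)) (N M : Int) (k : Nat) :
    (modificar_matriz matriz N M)[k]?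
      = (if 1 ≤ (k : Int) ∧ (k : Int) < N - 1 ∧ (k % 2 = 1) then
          (matriz[k]?).map (fun row => pvRev M (pvFill matriz N M (k : Int) row))
        else if 1 ≤ (k : Int) ∧ (k : Int) < N - 1 then
          (matriz[k]?).map (pvFill matriz N M (k : Int))
        else matriz[k]?) := by
  have hcopy : matriz.map (fun fila => PySem.List.slice fila none none) = matriz := by
    simp [PySem.List.slice_none_none]
  have h1 : ∀ mm : List (List Int),
      (PySem.List.pyRange 1 (N - 1) 1).foldl
        (fun mm i =>
          (PySem.List.pyRange 1 (M - 1) 1).foldl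
            (fun mm j =>
              PySem.List.pySetD mm i
                (PySem.List.pySetD (PySem.List.pyGetD mm i []) j (pvSumaVecinos matriz N M i j))) mm) mm
      = (PySem.List.pyRange 1 (N - 1) 1).foldl
          (fun mm i => mm.set i.toNat (pvFill matriz N M i (mm.getD i.toNat []))) mm := by
    intro mm
    apply PySem.List.foldl_congr_mem
    intro acc i himem
    have hi : (0 : Int) ≤ i := by
      have := (PySem.List.mem_pyRange_one.mp himem).1; omega
    have e1 : ∀ (xs : List (List Int)) (v : List Int),
        PySem.List.pySetD xs i v = xs.set i.toNat v := fun xs v =>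
      PySem.List.pySetD_of_nonneg xs v hi
    have e2 : ∀ xs : List (List Int), PySem.List.pyGetD xs i [] = xs.getD i.toNat [] :=
      fun xs => PySem.List.pyGetD_of_nonneg xs [] hi
    simp only [e1, e2]
    exact pv_inner_collapse i.toNat _ _ acc
  have h2 : ∀ mm : List (List Int),
      (PySem.List.pyRange 1 (N - 1) 2).foldl
        (fun mm i =>
          PySem.List.pySetD mm i
            (pvSetSlice (PySem.List.pyGetD mm i []) 1 (M - 1)
              (PySem.List.slice (PySem.List.pyGetD mm i []) (some 1) (some (M - 1))).reverse)) mm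
      = (PySem.List.pyRange 1 (N - 1) 2).foldl
          (fun mm i => mm.set i.toNat (pvRev M (mm.getD i.toNat []))) mm := by
    intro mm
    apply PySem.List.foldl_congr_mem
    intro acc i himem
    have hi : (0 : Int) ≤ i := by
      have := ((PySem.List.mem_pyRange_iff_of_pos (by norm_num) i).mp himem).1; omega
    rw [PySem.List.pySetD_of_nonneg _ _ hi, PySem.List.pyGetD_of_nonneg _ _ hi]
    rfl
  have hnn1 : ∀ i ∈ PySem.List.pyRange 1 (N - 1) 1, (0 : Int) ≤ i := by
    intro i hmem; have := (PySem.List.mem_pyRange_one.mp hmem).1; omega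
  have hnn2 : ∀ i ∈ PySem.List.pyRange 1 (N - 1) 2, (0 : Int) ≤ i := by
    intro i hmem
    have := ((PySem.List.mem_pyRange_iff_of_pos (by norm_num) i).mp hmem).1; omega
  have hr1 : ((k : Int) ∈ PySem.List.pyRange 1 (N - 1) 1) ↔ (1 ≤ (k : Int) ∧ (k : Int) < N - 1) :=
    PySem.List.mem_pyRange_one
  have hr2 : ((k : Int) ∈ PySem.List.pyRange 1 (N - 1) 2)
      ↔ (1 ≤ (k : Int) ∧ (k : Int) < N - 1 ∧ k % 2 = 1) := by
    rw [PySem.List.mem_pyRange_iff_of_pos (by norm_num)]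
    omega
  simp only [modificar_matriz, hcopy, h1, h2]
  rw [pv_foldl_set_char _ hnn2 (pv_pairwise_lt_pyRange_two _ _) _ _ k]
  rw [pv_foldl_set_char _ hnn1 (PySem.List.pairwise_lt_pyRange_one _ _) _ _ k]
  by_cases hc2 : 1 ≤ (k : Int) ∧ (k : Int) < N - 1 ∧ k % 2 = 1
  · rw [if_pos (hr2.mpr hc2), if_pos (hr1.mpr ⟨hc2.1, hc2.2.1⟩), if_pos hc2,
        Option.map_map]
    rfl
  · rw [if_neg (fun h => hc2 (hr2.mp h)), if_neg hc2]
    by_cases hc1 : 1 ≤ (k : Int) ∧ (k : Int) < N - 1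
    · rw [if_pos (hr1.mpr hc1), if_pos hc1]
    · rw [if_neg (fun h => hc1 (hr1.mp h)), if_neg hc1]

-- the zipped-slice sums, evaluated to an indexed comprehension over plain lists
theorem pv_zip_eval (u f d : List Int) (M : Int) (hM : 3 ≤ M)
    (hu : M - 1 ≤ (u.length : Int)) (hd : M - 1 ≤ (d.length : Int)) (hf : M ≤ (f.length : Int)) :
    pvSumaZip M u f d
      = (PySem.List.pyRange 1 (M - 1) 1).map
          (fun j => u.getD j.toNat 0 + d.getD j.toNat 0 +
                    f.getD (j - 1).toNat 0 + f.getD (j + 1).toNat 0) := by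
  obtain ⟨m, hm⟩ : ∃ m : Nat, M = (m : Int) + 2 := ⟨(M - 2).toNat, by omega⟩
  subst hm
  unfold pvSumaZip
  rw [PySem.List.slice_toNat u (by omega) (by omega),
      PySem.List.slice_toNat d (by omega) (by omega),
      PySem.List.slice_toNat f (by omega : (0:Int) ≤ 2) (by omega)]
  rw [show PySem.List.slice f (some 0) (some ((m:Int) + 2 - 2)) = f.take m by
    rw [PySem.List.slice_zero_start, PySem.List.slice_to f (by omega)]
    congr 1; omega]
  rw [show ((m:Int) + 2 - 1).toNat = m + 1 by omega, show ((1:Int)).toNat = 1 by rfl,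
      show ((m:Int) + 2).toNat = m + 2 by omega, show ((2:Int)).toNat = 2 by rfl]
  have hul : 1 + m ≤ u.length := by omega
  have hdl : 1 + m ≤ d.length := by omega
  have hfl : 2 + m ≤ f.length := by omega
  apply List.ext_getElem
  · simp [PySem.List.length_pyRange_one]
    omega
  · intro i h1 h2
    simp only [List.getElem_map, List.getElem_zip, List.getElem_take, List.getElem_drop]
    have hi : i < m := by
      simp [PySem.List.length_pyRange_one] at h2; omega
    rw [PySem.List.getElem_pyRange_one]
    have e1 : ((1:Int) + (i:Int)).toNat = 1 + i := by omega
    have e2 : ((1:Int) + (i:Int) - 1).toNat = i := by omega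
    have e3 : ((1:Int) + (i:Int) + 1).toNat = 2 + i := by omega
    rw [e1, e2, e3]
    rw [List.getD_eq_getElem u 0 (by omega), List.getD_eq_getElem d 0 (by omega),
        List.getD_eq_getElem f 0 (by omega), List.getD_eq_getElem f 0 (by omega)]

-- the zipped-slice sums equal A's interior neighbour sums for row k
theorem pv_zip_eq_vals (matriz : List (List Int)) (M : Int) (k : Nat) (hM : 3 ≤ M) (hk : 1 ≤ k)
    (hu : M - 1 ≤ ((matriz.getD (k - 1) []).length : Int))
    (hd : M - 1 ≤ ((matriz.getD (k + 1) []).length : Int))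
    (hf : M ≤ ((matriz.getD k []).length : Int)) :
    pvSumaZip M (matriz.getD (k - 1) []) (matriz.getD k []) (matriz.getD (k + 1) [])
      = pvVals matriz M (k : Int) := by
  rw [pv_zip_eval _ _ _ M hM hu hd hf]
  unfold pvVals
  apply List.map_congr_left
  intro j hj
  have hjb := PySem.List.mem_pyRange_one.mp hj
  have c1 : (k : Int) - 1 = ((k - 1 : Nat) : Int) := by omega
  have c2 : (k : Int) + 1 = ((k + 1 : Nat) : Int) := by omega
  unfold pvCell
  rw [c1, c2, PySem.List.pyGetD_natCast, PySem.List.pyGetD_natCast,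
      show (k : Int) = ((k : Nat) : Int) by rfl, PySem.List.pyGetD_natCast]
  rw [PySem.List.pyGetD_of_nonneg _ _ (by omega : (0:Int) ≤ j),
      PySem.List.pyGetD_of_nonneg _ _ (by omega : (0:Int) ≤ j),
      PySem.List.pyGetD_of_nonneg _ _ (by omega : (0:Int) ≤ j - 1),
      PySem.List.pyGetD_of_nonneg _ _ (by omega : (0:Int) ≤ j + 1)]

def pvGB (M : Int) (p : Int × (List Int × List Int)) : List Int :=
  PySem.List.slice p.2.1 none (some 1) ++
    (if PySem.Int.mod p.1 2 ≠ 0 then p.2.2.reverse else p.2.2) ++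
    PySem.List.slice p.2.1 (some (M - 1)) none

-- B in the main branch, expanded to the three concatenated segments
theorem pv_B_expand (matriz : List (List Int)) (N M : Int) (hN : 3 ≤ N) (hM : 3 ≤ M) :
    modificar_matriz_alt matriz N M
      = [matriz.getD 0 []] ++
        (PySem.List.enumerate
          ((((matriz.take N.toNat).drop 1).take (N.toNat - 2)).zip
            (((matriz.take N.toNat).zip
              ((((matriz.take N.toNat).drop 1)).zip ((matriz.take N.toNat).drop 2))).map
              (fun t => pvSumaZip M t.1 t.2.1 t.2.2))) 1).map (pvGB M) ++
        matriz.drop (N.toNat - 1) := by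
  unfold modificar_matriz_alt
  rw [if_neg (by omega : ¬(N < 3 ∨ M < 3))]
  simp only [PySem.List.slice_to matriz (by omega : (0:Int) ≤ N),
    PySem.List.slice_from _ (by omega : (0:Int) ≤ 1),
    PySem.List.slice_from _ (by omega : (0:Int) ≤ 2),
    PySem.List.slice_from _ (by omega : (0:Int) ≤ N - 1),
    PySem.List.slice_toNat _ (by omega : (0:Int) ≤ 1) (by omega : (0:Int) ≤ N - 1),
    PySem.List.foldl_append_singleton_eq_map, List.nil_append,
    PySem.List.slice_none_none, List.map_id',
    PySem.List.pyGetD_of_nonneg _ _ (le_refl (0:Int))]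
  rw [show ((1:Int)).toNat = 1 from rfl, show ((2:Int)).toNat = 2 from rfl,
      show ((0:Int)).toNat = 0 from rfl, show (N - 1).toNat = N.toNat - 1 by omega,
      show N.toNat - 1 - 1 = N.toNat - 2 from rfl]
  rfl

def pvBRow (matriz : List (List Int)) (M : Int) (k : Nat) (row : List Int) : List Int :=
  row.take 1 ++
    (if k % 2 = 1 then
      (pvSumaZip M (matriz.getD (k - 1) []) row (matriz.getD (k + 1) [])).reverse
     else pvSumaZip M (matriz.getD (k - 1) []) row (matriz.getD (k + 1) [])) ++
    row.drop (M - 1).toNat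

theorem pv_gb_row (matriz : List (List Int)) (M : Int) (k : Nat) (hM : 3 ≤ M)
    (hk : 1 ≤ k) (hk2 : k + 1 < matriz.length) :
    pvGB M ((k : Int), (matriz[k]'(by omega), pvSumaZip M (matriz[k - 1]'(by omega))
        (matriz[k]'(by omega)) (matriz[k + 1]'(by omega))))
      = pvBRow matriz M k (matriz[k]'(by omega)) := by
  have h1 : matriz.getD (k - 1) [] = matriz[k - 1]'(by omega) :=
    List.getD_eq_getElem matriz [] (by omega)
  have h2 : matriz.getD (k + 1) [] = matriz[k + 1]'(by omega) :=
    List.getD_eq_getElem matriz [] (by omega)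
  unfold pvGB pvBRow
  simp only [h1, h2]
  rw [PySem.List.slice_to _ (by omega : (0:Int) ≤ 1),
      PySem.List.slice_from _ (by omega : (0:Int) ≤ M - 1),
      show ((1:Int)).toNat = 1 from rfl]
  rw [show (2:Int) = ((2:Nat):Int) from rfl, PySem.Int.mod_natCast]
  by_cases hp : k % 2 = 1
  · rw [if_pos (show ((k % 2 : Nat) : Int) ≠ 0 by omega), if_pos hp]
  · rw [if_neg (show ¬((k % 2 : Nat) : Int) ≠ 0 by omega), if_neg hp]

theorem pv_B_char (matriz : List (List Int)) (N M : Int) (hN : 3 ≤ N) (hM : 3 ≤ M)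
    (hlen : N ≤ (matriz.length : Int)) (k : Nat) :
    (modificar_matriz_alt matriz N M)[k]?
      = if 1 ≤ (k : Int) ∧ (k : Int) < N - 1 then
          (matriz[k]?).map (pvBRow matriz M k)
        else matriz[k]? := by
  have hnL : N.toNat ≤ matriz.length := by omega
  set n := N.toNat with hn
  have hn3 : 3 ≤ n := by omega
  rw [pv_B_expand matriz N M hN hM, ← hn]
  set filas := matriz.take n with hfilas
  have hfl : filas.length = n := by simp [hfilas]; omega
  set ints := (filas.zip ((filas.drop 1).zip (filas.drop 2))).map
      (fun t => pvSumaZip M t.1 t.2.1 t.2.2) with hints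
  have hintslen : ints.length = n - 2 := by simp [hints, hfl]; omega
  set left := (filas.drop 1).take (n - 2) with hleft
  have hleftlen : left.length = n - 2 := by simp [hleft, hfl]; omega
  set Z := left.zip ints with hZ
  have hZlen : Z.length = n - 2 := by simp [hZ, hleftlen, hintslen]
  have hheadlen : (([matriz.getD 0 []] ++ (PySem.List.enumerate Z 1).map (pvGB M)).length) = n - 1 := by
    simp [PySem.List.length_enumerate, hZlen]; omega
  by_cases hki : 1 ≤ k ∧ k < n - 1
  · rw [List.getElem?_append_left (by omega), List.getElem?_append_right (by simp; omega)]
    rw [List.length_singleton]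
    rw [List.getElem?_map, PySem.List.getElem?_enumerate]
    have hZel : (left.zip ints)[k - 1]? = some (matriz[k]'(by omega),
        pvSumaZip M (matriz[k - 1]'(by omega))
        (matriz[k]'(by omega)) (matriz[k + 1]'(by omega))) := by
      have hl : k - 1 < (left.zip ints).length := by
        simp only [List.length_zip, hleftlen, hintslen]; omega
      rw [List.getElem?_eq_getElem hl]
      apply congrArg some
      have e1 : 1 + (k - 1) = k := by omega
      have e2 : 2 + (k - 1) = k + 1 := by omega
      simp only [List.getElem_zip, hleft, hints, hfilas, List.getElem_take,
        List.getElem_map, List.getElem_drop, e1, e2]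
    rw [hZ, hZel]
    simp only [Option.map_some]
    rw [show (1 : Int) + ((k - 1 : Nat) : Int) = (k : Int) by omega]
    rw [if_pos (show 1 ≤ (k:Int) ∧ (k:Int) < N - 1 by constructor <;> omega)]
    rw [List.getElem?_eq_getElem (by omega : k < matriz.length), Option.map_some]
    exact congrArg some (pv_gb_row matriz M k hM hki.1 (by omega))
  · rw [if_neg (by omega)]
    by_cases hk0 : k = 0
    · subst hk0
      rw [List.getElem?_append_left (by omega)]
      rw [List.getElem?_append_left (by simp)]
      rw [List.getElem?_singleton]
      rw [List.getElem?_eq_getElem (by omega : 0 < matriz.length)]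
      rw [List.getD_eq_getElem matriz [] (by omega : 0 < matriz.length)]
      rfl
    · have hkge : n - 1 ≤ k := by omega
      rw [List.getElem?_append_right (by omega)]
      rw [hheadlen, List.getElem?_drop]
      congr 1
      omega

-- ===== VERDICT (by name: the statement is the Claim_ definition above) =====
theorem modificar_matriz_spec : Claim_unchanged_modificar_matriz := by
  intro matriz N M hDom hPre
  unfold Spec_modificar_matriz
  intro hnD
  by_cases hbig : 3 ≤ N ∧ 3 ≤ M
  · obtain ⟨hN, hM⟩ := hbig
    obtain ⟨hlenN, hrows⟩ := hPre.2 ⟨hN, hM⟩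
    apply List.ext_getElem?
    intro k
    rw [pv_A_char, pv_B_char matriz N M hN hM hlenN]
    cases hrow : matriz[k]? with
    | none => split_ifs <;> simp
    | some row =>
      have hklen : k < matriz.length := by
        by_contra h
        rw [List.getElem?_eq_none (by omega)] at hrow
        simp at hrow
      have hgetD : matriz.getD k [] = row := by
        rw [List.getD_eq_getElem?_getD, hrow]; rfl
      by_cases hc1 : 1 ≤ (k : Int) ∧ (k : Int) < N - 1
      · have hrowlen : M ≤ (row.length : Int) := by
          have := (hrows k hklen).2 (by omega) (by omega); rwa [hgetD] at this
        have hu : M - 1 ≤ ((matriz.getD (k - 1) []).length : Int) :=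
          (hrows (k - 1) (by omega)).1 (by omega)
        have hd : M - 1 ≤ ((matriz.getD (k + 1) []).length : Int) :=
          (hrows (k + 1) (by omega)).1 (by push_cast; omega)
        have hzv : pvSumaZip M (matriz.getD (k - 1) []) row (matriz.getD (k + 1) [])
            = pvVals matriz M (k : Int) := by
          have := pv_zip_eq_vals matriz M k hM (by omega) hu hd (by rw [hgetD]; exact hrowlen)
          rwa [hgetD] at this
        have hfill := pv_fill_eval matriz N M k row hc1.1 hc1.2 hM hrowlen
        have hA1 : (row.take 1).length = 1 := by rw [List.length_take]; omega
        have hvlen : (pvVals matriz M (k : Int)).length = (M - 2).toNat := by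
          unfold pvVals; rw [List.length_map, PySem.List.length_pyRange_one]; omega
        have hb : M - 1 = 1 + ((pvVals matriz M (k : Int)).length : Int) := by
          rw [hvlen]; omega
        by_cases hpar : k % 2 = 1
        · rw [if_pos ⟨hc1.1, hc1.2, hpar⟩, if_pos hc1]
          simp only [Option.map_some, Option.some.injEq]
          unfold pvBRow
          rw [hzv, if_pos hpar, hfill]
          unfold pvRev
          rw [pv_slice_middle _ _ _ hA1 _ hb, pv_setSlice_middle _ _ _ _ hA1 _ hb]
        · rw [if_neg (fun h => hpar h.2.2), if_pos hc1, if_pos hc1]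
          simp only [Option.map_some, Option.some.injEq]
          unfold pvBRow
          rw [hzv, if_neg hpar, hfill]
      · rw [if_neg (fun h => hc1 ⟨h.1, h.2.1⟩), if_neg hc1, if_neg hc1]
  · have halt : modificar_matriz_alt matriz N M = matriz := by
      unfold modificar_matriz_alt
      rw [if_pos (by omega)]
      simp [PySem.List.slice_none_none, List.map_id']
    rw [halt]
    apply List.ext_getElem?
    intro k
    rw [pv_A_char]
    cases hrow : matriz[k]? with
    | none => split_ifs <;> simp
    | some row =>
      have hklen : k < matriz.length := by
        by_contra h
        rw [List.getElem?_eq_none (by omega)] at hrow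
        simp at hrow
      have hgetD : matriz.getD k [] = row := by
        rw [List.getD_eq_getElem?_getD, hrow]; rfl
      by_cases hc1 : 1 ≤ (k : Int) ∧ (k : Int) < N - 1
      · have hN3 : 3 ≤ N := by omega
        have hM : ¬ 3 ≤ M := by omega
        have hfill0 : pvFill matriz N M (k : Int) row = row := by
          unfold pvFill
          rw [PySem.List.pyRange_one_eq_nil (by omega : M - 1 ≤ 1)]
          rfl
        by_cases hpar : k % 2 = 1
        · rw [if_pos ⟨hc1.1, hc1.2, hpar⟩]
          simp only [Option.map_some, Option.some.injEq]
          rw [hfill0]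
          have hpal : (PySem.List.slice row (some 1) (some (M - 1))).reverse
              = PySem.List.slice row (some 1) (some (M - 1)) := by
            by_cases hM0 : M ≤ 0
            · by_contra hne
              exact hnD ⟨hM0, hN3, k, hklen, by omega, by omega, hpar,
                by rw [hgetD]; exact fun h => hne (h ▸ rfl)⟩
            · have hseg : PySem.List.slice row (some 1) (some (M - 1)) = [] := by
                rw [pv_slice_eq_clamp]
                have hle : PySem.List.clampIdx row.length (M - 1)
                    ≤ PySem.List.clampIdx row.length 1 := by
                  unfold PySem.List.clampIdx; split_ifs <;> omega
                rw [Nat.sub_eq_zero_of_le hle]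
                exact List.take_zero
              rw [hseg]; rfl
          unfold pvRev
          rw [hpal, pv_setSlice_slice_self]
        · rw [if_neg (fun h => hpar h.2.2), if_pos hc1]
          simp only [Option.map_some, Option.some.injEq]
          exact hfill0
      · rw [if_neg (fun h => hc1 ⟨h.1, h.2.1⟩), if_neg hc1]

theorem modificar_matriz_changed : Claim_changed_modificar_matriz := by
  unfold Claim_changed_modificar_matriz; decide

theorem modificar_matriz_tight : Claim_exact_modificar_matriz := by
  intro matriz N M hDom hPre hD heq
  obtain ⟨hM0, hN3, i, hilen, hi1, hiN, hipar, hne⟩ := hD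
  have halt : modificar_matriz_alt matriz N M = matriz := by
    unfold modificar_matriz_alt
    rw [if_pos (by omega)]
    simp [PySem.List.slice_none_none, List.map_id']
  rw [halt] at heq
  have hrow : matriz[i]? = some matriz[i] := List.getElem?_eq_getElem hilen
  have hgetD : matriz.getD i [] = matriz[i] := by
    rw [List.getD_eq_getElem?_getD, hrow]; rfl
  rw [hgetD] at hne
  have h := congrArg (fun l => l[i]?) heq
  simp only at h
  rw [pv_A_char, hrow] at h
  rw [if_pos ⟨by omega, by omega, hipar⟩] at h
  simp only [Option.map_some, Option.some.injEq] at h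
  have hfill0 : pvFill matriz N M (i : Int) matriz[i] = matriz[i] := by
    unfold pvFill
    rw [PySem.List.pyRange_one_eq_nil (by omega : M - 1 ≤ 1)]
    rfl
  rw [hfill0] at h
  unfold pvRev at h
  conv_rhs at h => rw [← pv_setSlice_slice_self matriz[i] 1 (M - 1)]
  unfold pvSetSlice at h
  rw [List.append_assoc, List.append_assoc] at h
  have h2 := List.append_cancel_left h
  have h3 := List.append_inj_left h2 (by rw [List.length_reverse])
  exact hne h3.symm
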